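-- pv_equiv track=rewrite | github.com/kimjiwook0129/Coding-Interivew-Cheatsheet | practices/adult_shark.py | nextCells
-- ===== SOURCE A (Python) =====
-- drow = [0, -1, 1, 0, 0]
--
-- dcol = [0, 0, 0, -1, 1]
--
-- def nextCells(smellTable, sharksState, N):
--     dirs = {}
--     for shark, state in sharksState.items():
--         dirs[shark] = []
--         for i in range(1, 5):
--             nrow = state[0] + drow[i]
--             ncol = state[1] + dcol[i]
--             if nrow >= 0 and nrow < N and ncol >= 0 and ncol < N:
--                 if smellTable[nrow][ncol]["smell"] == 0:
--                     dirs[shark].append((nrow, ncol, i))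
--         if len(dirs[shark]) > 0:
--             continue
--         for i in range(1, 5):
--             nrow = state[0] + drow[i]
--             ncol = state[1] + dcol[i]
--             if nrow >= 0 and nrow < N and ncol >= 0 and ncol < N:
--                 if smellTable[nrow][ncol]["smell"] == shark:
--                     dirs[shark].append((nrow, ncol, i))
--     return dirs
-- ===== SOURCE B (Python) =====
-- drow = [0, -1, 1, 0, 0]
--
-- dcol = [0, 0, 0, -1, 1]
--
-- def nextCells(smellTable, sharksState, N):
--     dirs = {}
--     for shark, state in sharksState.items():
--         empties, owns = [], []
--         for i in range(1, 5):
--             nrow = state[0] + drow[i]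
--             ncol = state[1] + dcol[i]
--             if nrow >= 0 and nrow < N and ncol >= 0 and ncol < N:
--                 s = smellTable[nrow][ncol]["smell"]
--                 if s == 0:
--                     empties.append((nrow, ncol, i))
--                 if s == shark:
--                     owns.append((nrow, ncol, i))
--         dirs[shark] = empties if empties else owns
--     return dirs
-- ===== Notes on version B (the rewrite author's own statement) =====
-- stated objective: simpler
-- what changed: B replaces A's two separate guarded direction passes (empty-smell pass, then an own-smell pass run only when the first found nothing) with a single scan over the four directions that buckets each valid neighbour into 'empties' or 'owns', followed by one final selection.
import Mathlib
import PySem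

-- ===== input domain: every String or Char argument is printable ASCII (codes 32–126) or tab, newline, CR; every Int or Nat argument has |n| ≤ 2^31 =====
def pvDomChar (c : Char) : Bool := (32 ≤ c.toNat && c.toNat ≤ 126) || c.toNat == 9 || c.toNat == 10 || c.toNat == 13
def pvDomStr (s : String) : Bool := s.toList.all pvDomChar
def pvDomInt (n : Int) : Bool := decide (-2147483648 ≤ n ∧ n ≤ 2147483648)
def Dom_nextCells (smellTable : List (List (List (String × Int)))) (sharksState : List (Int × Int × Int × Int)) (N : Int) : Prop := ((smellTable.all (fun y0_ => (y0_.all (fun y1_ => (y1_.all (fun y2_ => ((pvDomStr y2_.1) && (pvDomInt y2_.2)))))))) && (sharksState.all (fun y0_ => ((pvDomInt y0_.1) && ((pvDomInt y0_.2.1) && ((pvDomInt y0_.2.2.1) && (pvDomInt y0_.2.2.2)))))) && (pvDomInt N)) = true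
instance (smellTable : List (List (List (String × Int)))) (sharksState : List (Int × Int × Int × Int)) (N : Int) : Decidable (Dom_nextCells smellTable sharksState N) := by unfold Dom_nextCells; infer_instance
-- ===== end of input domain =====

-- B replaces A's two separate guarded passes (empty-smell pass, then an own-smell pass only
-- when the first found nothing) by ONE scan over the four directions collecting two buckets,
-- then a final selection; objective: simpler.

def pvDrow : List Int := [0, -1, 1, 0, 0]
def pvDcol : List Int := [0, 0, 0, -1, 1]

-- smell lookup smellTable[nrow][ncol]["smell"]; the defaults are never reached inside
-- Pre_nextCells (Python raises IndexError/KeyError exactly there)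
def pvSmell (smellTable : List (List (List (String × Int)))) (nrow ncol : Int) : Int :=
  PySem.Dict.getD (PySem.Dict.mk (PySem.List.pyGetD (PySem.List.pyGetD smellTable nrow []) ncol [])) "smell" 0

-- ===== PORT A =====
def nextCells (smellTable : List (List (List (String × Int)))) (sharksState : List (Int × Int × Int × Int)) (N : Int) : List (Int × List (Int × Int × Int)) :=
  (sharksState.foldl (fun dirs p =>
    let shark := p.1
    let state := p.2
    let dirs := PySem.Dict.insert dirs shark []
    -- first loop: empty-smell neighbours
    let l1 := (PySem.List.pyRange 1 5 1).foldl (fun acc i =>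
      let nrow := state.1 + PySem.List.pyGetD pvDrow i 0
      let ncol := state.2.1 + PySem.List.pyGetD pvDcol i 0
      if nrow ≥ 0 ∧ nrow < N ∧ ncol ≥ 0 ∧ ncol < N then
        if pvSmell smellTable nrow ncol = 0 then acc ++ [(nrow, ncol, i)] else acc
      else acc) []
    let dirs := PySem.Dict.insert dirs shark l1
    if l1.length > 0 then dirs
    else
      -- second loop: own-smell neighbours, appended to dirs[shark] (= l1 = [])
      let l2 := (PySem.List.pyRange 1 5 1).foldl (fun acc i =>
        let nrow := state.1 + PySem.List.pyGetD pvDrow i 0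
        let ncol := state.2.1 + PySem.List.pyGetD pvDcol i 0
        if nrow ≥ 0 ∧ nrow < N ∧ ncol ≥ 0 ∧ ncol < N then
          if pvSmell smellTable nrow ncol = shark then acc ++ [(nrow, ncol, i)] else acc
        else acc) l1
      PySem.Dict.insert dirs shark l2)
    (PySem.Dict.empty)).items

-- ===== PORT B =====
def nextCells_alt (smellTable : List (List (List (String × Int)))) (sharksState : List (Int × Int × Int × Int)) (N : Int) : List (Int × List (Int × Int × Int)) :=
  (sharksState.foldl (fun dirs p =>
    let eo := (PySem.List.pyRange 1 5 1).foldl (fun eo i =>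
      let nrow := p.2.1 + PySem.List.pyGetD pvDrow i 0
      let ncol := p.2.2.1 + PySem.List.pyGetD pvDcol i 0
      if nrow ≥ 0 ∧ nrow < N ∧ ncol ≥ 0 ∧ ncol < N then
        let s := pvSmell smellTable nrow ncol
        let eo := if s = 0 then (eo.1 ++ [(nrow, ncol, i)], eo.2) else eo
        if s = p.1 then (eo.1, eo.2 ++ [(nrow, ncol, i)]) else eo
      else eo) (([], []) : List (Int × Int × Int) × List (Int × Int × Int))
    PySem.Dict.insert dirs p.1 (if eo.1.isEmpty then eo.2 else eo.1))
    (PySem.Dict.empty)).items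

-- ===== PRECONDITION & SPEC =====
-- Pre_ excludes exactly the inputs on which Python A raises: an in-bounds (w.r.t. N)
-- neighbour of some shark must index an existing row/cell carrying a "smell" key,
-- otherwise smellTable[nrow][ncol]["smell"] raises IndexError/KeyError.
def Pre_nextCells (smellTable : List (List (List (String × Int)))) (sharksState : List (Int × Int × Int × Int)) (N : Int) : Prop :=
  ∀ p ∈ sharksState, ∀ i ∈ PySem.List.pyRange 1 5 1,
    (0 ≤ p.2.1 + PySem.List.pyGetD pvDrow i 0 ∧ p.2.1 + PySem.List.pyGetD pvDrow i 0 < N ∧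
     0 ≤ p.2.2.1 + PySem.List.pyGetD pvDcol i 0 ∧ p.2.2.1 + PySem.List.pyGetD pvDcol i 0 < N) →
    ((PySem.List.pyGet? smellTable (p.2.1 + PySem.List.pyGetD pvDrow i 0)).bind (fun row =>
      (PySem.List.pyGet? row (p.2.2.1 + PySem.List.pyGetD pvDcol i 0)).map (fun cell =>
        (PySem.Dict.mk cell).contains "smell"))).getD false = true
instance (smellTable : List (List (List (String × Int)))) (sharksState : List (Int × Int × Int × Int)) (N : Int) : Decidable (Pre_nextCells smellTable sharksState N) := by unfold Pre_nextCells; infer_instance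

def pvWitness_nextCells : (List (List (List (String × Int)))) × (List (Int × Int × Int × Int)) × Int :=
  ([[[("smell", 0)], [("smell", 1)]], [[("smell", 1)], [("smell", 0)]]], [(1, 0, 0, 0)], 2)

def Spec_nextCells (smellTable : List (List (List (String × Int)))) (sharksState : List (Int × Int × Int × Int)) (N : Int) (out : List (Int × List (Int × Int × Int))) : Prop := out = nextCells_alt smellTable sharksState N
instance (smellTable : List (List (List (String × Int)))) (sharksState : List (Int × Int × Int × Int)) (N : Int) (out : List (Int × List (Int × Int × Int))) : Decidable (Spec_nextCells smellTable sharksState N out) := by unfold Spec_nextCells; infer_instance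

-- ===== CLAIM (what is proved, stated in full; the proofs are below) =====
def Claim_equal_nextCells : Prop := ∀ (smellTable : List (List (List (String × Int)))) (sharksState : List (Int × Int × Int × Int)) (N : Int), Dom_nextCells smellTable sharksState N → Pre_nextCells smellTable sharksState N → Spec_nextCells smellTable sharksState N (nextCells smellTable sharksState N)

-- ===== LEMMAS AND PROOFS =====

-- B's single two-bucket scan equals A's two passes, for any direction list and accumulators.
theorem pv_bucket_eq (smellTable : List (List (List (String × Int)))) (N shark r c : Int) :
    ∀ (l : List Int) (e o : List (Int × Int × Int)),
    (l.foldl (fun eo i =>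
      let nrow := r + PySem.List.pyGetD pvDrow i 0
      let ncol := c + PySem.List.pyGetD pvDcol i 0
      if nrow ≥ 0 ∧ nrow < N ∧ ncol ≥ 0 ∧ ncol < N then
        let s := pvSmell smellTable nrow ncol
        let eo := if s = 0 then (eo.1 ++ [(nrow, ncol, i)], eo.2) else eo
        if s = shark then (eo.1, eo.2 ++ [(nrow, ncol, i)]) else eo
      else eo) ((e, o) : List (Int × Int × Int) × List (Int × Int × Int)))
    = (l.foldl (fun acc i =>
        let nrow := r + PySem.List.pyGetD pvDrow i 0
        let ncol := c + PySem.List.pyGetD pvDcol i 0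
        if nrow ≥ 0 ∧ nrow < N ∧ ncol ≥ 0 ∧ ncol < N then
          if pvSmell smellTable nrow ncol = 0 then acc ++ [(nrow, ncol, i)] else acc
        else acc) e,
       l.foldl (fun acc i =>
        let nrow := r + PySem.List.pyGetD pvDrow i 0
        let ncol := c + PySem.List.pyGetD pvDcol i 0
        if nrow ≥ 0 ∧ nrow < N ∧ ncol ≥ 0 ∧ ncol < N then
          if pvSmell smellTable nrow ncol = shark then acc ++ [(nrow, ncol, i)] else acc
        else acc) o) := by
  intro l
  induction l with
  | nil => intro e o; rfl
  | cons i l ih =>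
    intro e o
    simp only [List.foldl_cons]
    split_ifs <;> exact ih _ _

-- per-shark step functions of the two outer folds agree
theorem pv_step_eq (smellTable : List (List (List (String × Int)))) (N : Int)
    (dirs : PySem.Dict Int (List (Int × Int × Int))) (p : Int × Int × Int × Int) :
    (let shark := p.1
     let state := p.2
     let dirs := PySem.Dict.insert dirs shark []
     let l1 := (PySem.List.pyRange 1 5 1).foldl (fun acc i =>
       let nrow := state.1 + PySem.List.pyGetD pvDrow i 0
       let ncol := state.2.1 + PySem.List.pyGetD pvDcol i 0
       if nrow ≥ 0 ∧ nrow < N ∧ ncol ≥ 0 ∧ ncol < N then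
         if pvSmell smellTable nrow ncol = 0 then acc ++ [(nrow, ncol, i)] else acc
       else acc) []
     let dirs := PySem.Dict.insert dirs shark l1
     if l1.length > 0 then dirs
     else
       let l2 := (PySem.List.pyRange 1 5 1).foldl (fun acc i =>
         let nrow := state.1 + PySem.List.pyGetD pvDrow i 0
         let ncol := state.2.1 + PySem.List.pyGetD pvDcol i 0
         if nrow ≥ 0 ∧ nrow < N ∧ ncol ≥ 0 ∧ ncol < N then
           if pvSmell smellTable nrow ncol = shark then acc ++ [(nrow, ncol, i)] else acc
         else acc) l1
       PySem.Dict.insert dirs shark l2)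
    = (let eo := (PySem.List.pyRange 1 5 1).foldl (fun eo i =>
        let nrow := p.2.1 + PySem.List.pyGetD pvDrow i 0
        let ncol := p.2.2.1 + PySem.List.pyGetD pvDcol i 0
        if nrow ≥ 0 ∧ nrow < N ∧ ncol ≥ 0 ∧ ncol < N then
          let s := pvSmell smellTable nrow ncol
          let eo := if s = 0 then (eo.1 ++ [(nrow, ncol, i)], eo.2) else eo
          if s = p.1 then (eo.1, eo.2 ++ [(nrow, ncol, i)]) else eo
        else eo) (([], []) : List (Int × Int × Int) × List (Int × Int × Int))
       PySem.Dict.insert dirs p.1 (if eo.1.isEmpty then eo.2 else eo.1)) := by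
  simp only [pv_bucket_eq smellTable N p.1 p.2.1 p.2.2.1]
  set l1 := (PySem.List.pyRange 1 5 1).foldl (fun acc i =>
       let nrow := p.2.1 + PySem.List.pyGetD pvDrow i 0
       let ncol := p.2.2.1 + PySem.List.pyGetD pvDcol i 0
       if nrow ≥ 0 ∧ nrow < N ∧ ncol ≥ 0 ∧ ncol < N then
         if pvSmell smellTable nrow ncol = 0 then acc ++ [(nrow, ncol, i)] else acc
       else acc) [] with hl1
  cases l1 with
  | nil => simp [PySem.Dict.insert_insert_self]
  | cons x xs => simp [PySem.Dict.insert_insert_self]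

theorem nextCells_eq_alt (smellTable : List (List (List (String × Int)))) (sharksState : List (Int × Int × Int × Int)) (N : Int) :
    nextCells smellTable sharksState N = nextCells_alt smellTable sharksState N := by
  unfold nextCells nextCells_alt
  congr 1
  apply List.foldl_ext
  intro dirs p _
  exact pv_step_eq smellTable N dirs p

-- ===== VERDICT (by name: the statement is the Claim_ definition above) =====
theorem nextCells_spec : Claim_equal_nextCells := by
  intro smellTable sharksState N _ _
  exact nextCells_eq_alt smellTable sharksState N
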